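-- pv_equiv track=rewrite | github.com/alpoi/codesignal | Intro/(2) Edge of the Ocean/make_array_consecutive_2.py | solution
-- ===== SOURCE A (Python) =====
-- def solution(statues):
--     stat = statues
--     count = 0
--     for num in stat:
--         if num < max(stat) and (num + 1) not in stat:
--             stat.append(num + 1)
--             count += 1
--     return count
-- ===== SOURCE B (Python) =====
-- def solution(statues):
--     if not statues:
--         return 0
--     return max(statues) - min(statues) + 1 - len(set(statues))
-- ===== Notes on version B (the rewrite author's own statement) =====
-- stated objective: faster
-- what changed: Replaced the quadratic grow-the-list loop (which rescans the list with max() and a membership test on every iteration while appending missing values) by the closed form max-min+1-len(set(statues)), with empty input returning 0 as A does.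
import Mathlib
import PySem

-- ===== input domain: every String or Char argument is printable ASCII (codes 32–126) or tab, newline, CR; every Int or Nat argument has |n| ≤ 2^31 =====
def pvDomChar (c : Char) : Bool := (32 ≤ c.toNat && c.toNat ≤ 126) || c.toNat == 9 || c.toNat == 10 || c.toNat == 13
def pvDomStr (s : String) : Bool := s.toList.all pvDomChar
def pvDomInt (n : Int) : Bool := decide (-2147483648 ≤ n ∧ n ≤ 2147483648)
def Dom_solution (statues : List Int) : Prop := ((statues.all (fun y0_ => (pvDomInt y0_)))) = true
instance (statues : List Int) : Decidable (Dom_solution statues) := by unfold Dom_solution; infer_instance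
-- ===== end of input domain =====

-- B replaces A's quadratic grow-the-list loop by the closed form max-min+1-len(set); equivalence is about the
-- RETURN value only: Python A appends the missing values to the caller's list in place, B does not mutate it.

-- ===== PORT A =====
-- Python's `for num in stat` over the list A keeps appending to is an index loop that re-reads the current
-- list each step; `fuel` only guards totality (it is proved ≥ the number of iterations actually executed).
def solutionLoop : Nat → List Int → Nat → Int → Int
  | 0, _, _, count => count
  | fuel + 1, stat, i, count =>
    if h : i < stat.length then
      let num := stat[i]
      -- max(stat): stat is nonempty here, so max? = some _ and the getD default is unreachable
      if num < (PySem.List.max? stat (fun x => x)).getD 0 ∧ num + 1 ∉ stat then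
        solutionLoop fuel (stat ++ [num + 1]) (i + 1) (count + 1)
      else
        solutionLoop fuel stat (i + 1) count
    else count

def solution (statues : List Int) : Int :=
  solutionLoop
    (statues.length +
      ((PySem.List.max? statues (fun x => x)).getD 0
        - (PySem.List.min? statues (fun x => x)).getD 0 + 1).toNat)
    statues 0 0

-- ===== PORT B =====
def solution_alt (statues : List Int) : Int :=
  if statues = [] then 0
  else
    -- statues ≠ [], so both max? and min? are some _ and the getD defaults are unreachable
    (PySem.List.max? statues (fun x => x)).getD 0
      - (PySem.List.min? statues (fun x => x)).getD 0 + 1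
      - ((PySem.Set.ofList statues).length : Int)

-- ===== PRECONDITION & SPEC =====
def Spec_solution (statues : List Int) (out : Int) : Prop := out = solution_alt statues
instance (statues : List Int) (out : Int) : Decidable (Spec_solution statues out) := by unfold Spec_solution; infer_instance

-- ===== CLAIM (what is proved, stated in full; the proofs are below) =====
def Claim_equal_solution : Prop := ∀ (statues : List Int), Dom_solution statues → Spec_solution statues (solution statues)

-- ===== LEMMAS AND PROOFS =====

-- the value of max(stat) / min(stat) when an extremal element is known
lemma max_getD_eq (stat : List Int) (M : Int) (hM : M ∈ stat) (hle : ∀ x ∈ stat, x ≤ M) :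
    (PySem.List.max? stat (fun x => x)).getD 0 = M := by
  cases hmx : PySem.List.max? stat (fun x => x) with
  | none => exact absurd ((PySem.List.max?_eq_none_iff _ _).mp hmx ▸ hM) (List.not_mem_nil)
  | some x =>
    have hx : x ∈ stat := PySem.List.max?_mem hmx
    have h1 : M ≤ x := PySem.List.max?_isMax hmx M hM
    have h2 : x ≤ M := hle x hx
    simpa using le_antisymm h2 h1

-- once every index has been processed, the list covers the whole interval [m, M]
lemma covers_of_processed (stat : List Int) (m M : Int)
    (h2 : ∀ j (_ : j < stat.length), stat[j] < M → stat[j] + 1 ∈ stat)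
    (hm : m ∈ stat) :
    ∀ k : Nat, m + k ≤ M → m + k ∈ stat := by
  intro k
  induction k with
  | zero => intro _; simpa using hm
  | succ k ih =>
    intro hk
    have hmem : m + k ∈ stat := ih (by push_cast at hk ⊢; omega)
    obtain ⟨j, hj, hjv⟩ := List.mem_iff_getElem.mp hmem
    have hlt : stat[j] < M := by rw [hjv]; push_cast at hk ⊢; omega
    have hstep := h2 j hj hlt
    rw [hjv] at hstep
    have heq : m + ((k + 1 : Nat) : Int) = m + (k : Int) + 1 := by push_cast; ring
    rwa [heq]

lemma finset_eq_Icc (stat : List Int) (m M : Int)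
    (h2 : ∀ j (_ : j < stat.length), stat[j] < M → stat[j] + 1 ∈ stat)
    (h3 : ∀ x ∈ stat, m ≤ x ∧ x ≤ M) (hm : m ∈ stat) :
    stat.toFinset = Finset.Icc m M := by
  apply Finset.ext
  intro v
  simp only [List.mem_toFinset, Finset.mem_Icc]
  constructor
  · exact fun hv => h3 v hv
  · rintro ⟨hl, hr⟩
    have := covers_of_processed stat m M h2 hm (v - m).toNat
      (by rw [Int.toNat_of_nonneg (by omega)]; omega)
    rwa [Int.toNat_of_nonneg (by omega), add_sub_cancel] at this

-- the loop invariant: solutionLoop returns (M - m + 1) - |set(statues)|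
lemma loop_inv (S0 : Finset Int) (L0 : Nat) (m M : Int) :
    ∀ (fuel : Nat) (stat : List Int) (i : Nat) (count : Int),
    i ≤ stat.length →
    (∀ j (_ : j < i) (_ : j < stat.length), stat[j] < M → stat[j] + 1 ∈ stat) →
    (∀ x ∈ stat, m ≤ x ∧ x ≤ M) →
    M ∈ stat → m ∈ stat →
    count = (stat.toFinset.card : Int) - S0.card →
    (stat.length : Int) = (L0 : Int) + stat.toFinset.card - S0.card →
    (fuel : Int) + i ≥ (L0 : Int) + (M - m + 1) - S0.card →
    solutionLoop fuel stat i count = (M - m + 1) - (S0.card : Int) := by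
  intro fuel
  induction fuel with
  | zero =>
    intro stat i count h1 h2 h3 h4 h4' h5 h6 hfuel
    -- fuel 0: the invariant forces i = stat.length, so the loop had in fact finished
    have hsub : stat.toFinset ⊆ Finset.Icc m M := by
      intro x hx
      rw [List.mem_toFinset] at hx
      exact Finset.mem_Icc.mpr (h3 x hx)
    have hcard : (stat.toFinset.card : Int) ≤ M - m + 1 := by
      have := Finset.card_le_card hsub
      have hIcc : (Finset.Icc m M).card = (M + 1 - m).toNat := Int.card_Icc m M
      have hmM : m ≤ M := (h3 M h4).1
      omega
    have hi : i = stat.length := by omega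
    rw [solutionLoop]
    have hfin : stat.toFinset = Finset.Icc m M :=
      finset_eq_Icc stat m M (fun j hj => h2 j (hi ▸ hj) hj) h3 h4'
    have hmM : m ≤ M := (h3 M h4).1
    have : (stat.toFinset.card : Int) = M - m + 1 := by
      rw [hfin]
      have := Int.card_Icc m M
      omega
    omega
  | succ fuel ih =>
    intro stat i count h1 h2 h3 h4 h4' h5 h6 hfuel
    rw [solutionLoop]
    by_cases hlen : i < stat.length
    · simp only [hlen, dif_pos]
      have hmax : (PySem.List.max? stat (fun x => x)).getD 0 = M :=
        max_getD_eq stat M h4 (fun x hx => (h3 x hx).2)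
      rw [hmax]
      set num := stat[i] with hnum
      by_cases hcond : num < M ∧ num + 1 ∉ stat
      · simp only [hcond]
        have hnew : num + 1 ∉ stat.toFinset := by
          rw [List.mem_toFinset]; exact hcond.2
        have htf : (stat ++ [num + 1]).toFinset = insert (num + 1) stat.toFinset := by
          simp [List.toFinset_append]
        have hcard : (stat ++ [num + 1]).toFinset.card = stat.toFinset.card + 1 := by
          rw [htf, Finset.card_insert_of_notMem hnew]
        have hnuml : m ≤ num ∧ num ≤ M := h3 num (List.getElem_mem hlen)
        apply ih
        · simp; omega
        · intro j hj hjl hlt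
          rcases Nat.lt_succ_iff_lt_or_eq.mp hj with hj' | hj'
          · have hjs : j < stat.length := by omega
            have hgv : (stat ++ [num + 1])[j] = stat[j] :=
              List.getElem_append_left hjs
            rw [hgv] at hlt ⊢
            exact List.mem_append_left _ (h2 j hj' hjs hlt)
          · subst hj'
            have hgv : (stat ++ [num + 1])[j] = num := by
              rw [List.getElem_append_left hlen]
            rw [hgv]
            simp
        · intro x hx
          rcases List.mem_append.mp hx with hx | hx
          · exact h3 x hx
          · simp at hx; subst hx; omega
        · exact List.mem_append_left _ h4
        · exact List.mem_append_left _ h4'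
        · rw [hcard]; push_cast; omega
        · rw [hcard]; simp; omega
        · push_cast at hfuel ⊢; omega
      · simp only [hcond, if_false]
        apply ih stat (i + 1) count _ _ h3 h4 h4' h5 h6
        · push_cast at hfuel ⊢; omega
        · omega
        · intro j hj hjl hlt
          rcases Nat.lt_succ_iff_lt_or_eq.mp hj with hj' | hj'
          · exact h2 j hj' hjl hlt
          · subst hj'
            rw [Classical.not_and_iff_not_or_not, not_not] at hcond
            exact Or.resolve_left hcond (not_not_intro (by rwa [← hnum] at hlt))
    · simp only [hlen, dif_neg, not_false_iff]
      have hi : i = stat.length := by omega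
      have hfin : stat.toFinset = Finset.Icc m M :=
        finset_eq_Icc stat m M (fun j hj => h2 j (hi ▸ hj) hj) h3 h4'
      have hmM : m ≤ M := (h3 M h4).1
      have : (stat.toFinset.card : Int) = M - m + 1 := by
        rw [hfin]
        have := Int.card_Icc m M
        omega
      omega

-- |set(l)| = |l.toFinset|
lemma setOfList_length (l : List Int) :
    ((PySem.Set.ofList l).length : Int) = (l.toFinset.card : Int) := by
  have hnd : (PySem.Set.ofList l).Nodup := PySem.Set.nodup_ofList l
  have htf : (PySem.Set.ofList l).toFinset = l.toFinset := by
    apply Finset.ext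
    intro x
    simp [List.mem_toFinset, PySem.Set.mem_ofList]
  rw [← htf, List.toFinset_card_of_nodup hnd]

-- ===== VERDICT (by name: the statement is the Claim_ definition above) =====
theorem solution_spec : Claim_equal_solution := by
  intro statues _
  unfold Spec_solution solution solution_alt
  cases hs : statues with
  | nil => decide
  | cons a t =>
    rw [← hs]
    have hne : statues ≠ [] := by simp [hs]
    simp only [hne, ite_false]
    -- the max and min of the nonempty list
    obtain ⟨M, hM⟩ : ∃ M, PySem.List.max? statues (fun x => x) = some M := by
      cases hmx : PySem.List.max? statues (fun x => x) with
      | none => exact absurd ((PySem.List.max?_eq_none_iff _ _).mp hmx) hne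
      | some x => exact ⟨x, rfl⟩
    obtain ⟨m, hm⟩ : ∃ m, PySem.List.min? statues (fun x => x) = some m := by
      cases hmn : PySem.List.min? statues (fun x => x) with
      | none => exact absurd ((PySem.List.min?_eq_none_iff _ _).mp hmn) hne
      | some x => exact ⟨x, rfl⟩
    have hMmem : M ∈ statues := PySem.List.max?_mem hM
    have hmmem : m ∈ statues := PySem.List.min?_mem hm
    have hMmax : ∀ x ∈ statues, x ≤ M := fun x hx => PySem.List.max?_isMax hM x hx
    have hmmin : ∀ x ∈ statues, m ≤ x := fun x hx => PySem.List.min?_isMin hm x hx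
    have hmM : m ≤ M := hmmin M hMmem
    rw [hM, hm]
    simp only [Option.getD_some]
    have hcardpos : 1 ≤ statues.toFinset.card :=
      Finset.card_pos.mpr ⟨M, List.mem_toFinset.mpr hMmem⟩
    rw [loop_inv statues.toFinset statues.length m M _ statues 0 0
      (by omega) (by omega) (fun x hx => ⟨hmmin x hx, hMmax x hx⟩) hMmem hmmem
      (by simp) (by simp)
      (by push_cast [Int.toNat_of_nonneg (show (0:Int) ≤ M - m + 1 by omega)]; omega)]
    rw [setOfList_length]
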